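-- pv_equiv track=rewrite | github.com/leonardomartins777/logica-matematica | sudoku.py | construir_tabela
-- ===== SOURCE A (Python) =====
-- def construir_tabela(N):
--     tam = 1
--     tabela = []
--
--     for i in range(N):
--         conj_i = []
--         for j in range(N):
--             conj_j = []
--             for k in range(N):
--                 conj_j.append(tam)
--                 tam = tam + 1
--             conj_i.append(conj_j)
--         tabela.append(conj_i)
--
--     return tabela
-- ===== SOURCE B (Python) =====
-- def construir_tabela(N):
--     flat = range(1, N * N * N + 1)
--     blocos = [flat[b * N * N:(b + 1) * N * N] for b in range(N)]
--     return [[list(bloco[j * N:(j + 1) * N]) for j in range(N)] for bloco in blocos]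
-- ===== Notes on version B (the rewrite author's own statement) =====
-- stated objective: alternative
-- what changed: Describes all values as the single flat sequence range(1, N^3+1) and reshapes it in two staged slicing passes (split into N blocks of N^2, then each block into N rows), instead of generating each value inside three nested loops threading a mutable counter.
import Mathlib
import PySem

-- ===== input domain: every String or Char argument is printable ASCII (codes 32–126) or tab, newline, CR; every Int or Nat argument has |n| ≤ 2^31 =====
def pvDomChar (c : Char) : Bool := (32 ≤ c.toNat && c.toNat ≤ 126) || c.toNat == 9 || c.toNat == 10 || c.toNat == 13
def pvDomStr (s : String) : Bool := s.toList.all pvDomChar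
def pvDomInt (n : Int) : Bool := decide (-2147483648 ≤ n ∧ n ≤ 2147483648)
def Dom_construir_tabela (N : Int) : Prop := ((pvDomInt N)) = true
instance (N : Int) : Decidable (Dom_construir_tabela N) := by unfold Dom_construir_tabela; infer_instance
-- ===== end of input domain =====

-- B generates all values as one flat list 1..N^3 and reshapes it by two staged
-- slicing passes (N blocks of N^2, then each block into N rows), instead of A's
-- three nested loops threading a running counter (objective: alternative).

-- ===== PORT A =====
def construir_tabela (N : Int) : List (List (List Int)) :=
  let r := PySem.List.pyRange 0 N 1
  let s := r.foldl (fun (st : Int × List (List (List Int))) (_i : Int) =>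
    let si := r.foldl (fun (st2 : Int × List (List Int)) (_j : Int) =>
      let sj := r.foldl (fun (st3 : Int × List Int) (_k : Int) =>
        (st3.1 + 1, st3.2 ++ [st3.1])) (st2.1, ([] : List Int))
      (sj.1, st2.2 ++ [sj.2])) (st.1, ([] : List (List Int)))
    (si.1, st.2 ++ [si.2])) (1, ([] : List (List (List Int))))
  s.2

-- ===== PORT B =====
def construir_tabela_alt (N : Int) : List (List (List Int)) :=
  let flat := PySem.List.pyRange 1 (N * N * N + 1) 1
  let blocos := (PySem.List.pyRange 0 N 1).map (fun b =>
    PySem.List.slice flat (some (b * N * N)) (some ((b + 1) * N * N)))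
  blocos.map (fun bloco =>
    (PySem.List.pyRange 0 N 1).map (fun j =>
      PySem.List.slice bloco (some (j * N)) (some ((j + 1) * N))))

-- ===== PRECONDITION & SPEC =====
def Spec_construir_tabela (N : Int) (out : List (List (List Int))) : Prop := out = construir_tabela_alt N
instance (N : Int) (out : List (List (List Int))) : Decidable (Spec_construir_tabela N out) := by unfold Spec_construir_tabela; infer_instance

-- ===== CLAIM (what is proved, stated in full; the proofs are below) =====
def Claim_equal_construir_tabela : Prop := ∀ (N : Int), Dom_construir_tabela N → Spec_construir_tabela N (construir_tabela N)

-- ===== LEMMAS AND PROOFS =====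

-- peel the first element off a shifted range-map
theorem pv_shift {B : Type} (n : Nat) (c t : Int) (E : Int → B) :
    (List.range (n+1)).map (fun (i : Nat) => E (t + (i : Int) * c))
      = E t :: (List.range n).map (fun (i : Nat) => E (t + c + (i : Int) * c)) := by
  rw [List.range_succ_eq_map, List.map_cons, List.map_map]
  congr 1
  · norm_num
  · apply List.map_congr_left; intro i _
    simp only [Function.comp_apply]
    congr 1
    push_cast; ring

-- one generic level of A's loop: counter advances by c, body appended from the counter
theorem pv_foldgen {B : Type} (E : Int → B) (c : Int) (l : List Int) (t : Int) (acc : List B) :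
    List.foldl (fun (st : Int × List B) (_ : Int) => (st.1 + c, st.2 ++ [E st.1])) (t, acc) l
      = (t + l.length * c, acc ++ (List.range l.length).map (fun (i : Nat) => E (t + (i : Int) * c))) := by
  induction l generalizing t acc with
  | nil => simp
  | cons x xs ih =>
    simp only [List.foldl_cons]
    rw [ih, List.length_cons, pv_shift]
    refine Prod.ext ?_ ?_
    · push_cast; ring
    · simp

-- innermost loop of A
theorem pv_fold1 (l : List Int) (t : Int) (acc : List Int) :
    List.foldl (fun (st3 : Int × List Int) (_ : Int) => (st3.1 + 1, st3.2 ++ [st3.1])) (t, acc) l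
      = (t + l.length, acc ++ (List.range l.length).map (fun (k : Nat) => t + (k : Int))) := by
  have h := pv_foldgen (fun x : Int => x) 1 l t acc
  simp only [mul_one] at h
  exact h

-- middle loop of A
theorem pv_fold2 (li l : List Int) (t : Int) (acc : List (List Int)) :
    List.foldl (fun (st2 : Int × List (List Int)) (_ : Int) =>
        let sj := List.foldl (fun (st3 : Int × List Int) (_ : Int) => (st3.1 + 1, st3.2 ++ [st3.1]))
          (st2.1, ([] : List Int)) li
        (sj.1, st2.2 ++ [sj.2])) (t, acc) l
      = (t + l.length * li.length,
         acc ++ (List.range l.length).map (fun (j : Nat) =>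
           (List.range li.length).map (fun (k : Nat) => t + (j : Int) * (li.length : Int) + (k : Int)))) := by
  simp only [pv_fold1]
  exact pv_foldgen (fun x : Int => (List.range li.length).map (fun (k : Nat) => x + (k : Int)))
    (li.length : Int) l t acc

-- outer loop of A
theorem pv_fold3 (li l : List Int) (t : Int) (acc : List (List (List Int))) :
    List.foldl (fun (st : Int × List (List (List Int))) (_ : Int) =>
        let si := List.foldl (fun (st2 : Int × List (List Int)) (_ : Int) =>
            let sj := List.foldl (fun (st3 : Int × List Int) (_ : Int) => (st3.1 + 1, st3.2 ++ [st3.1]))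
              (st2.1, ([] : List Int)) li
            (sj.1, st2.2 ++ [sj.2])) (st.1, ([] : List (List Int))) li
        (si.1, st.2 ++ [si.2])) (t, acc) l
      = (t + l.length * ((li.length : Int) * (li.length : Int)),
         acc ++ (List.range l.length).map (fun (i : Nat) =>
           (List.range li.length).map (fun (j : Nat) =>
             (List.range li.length).map (fun (k : Nat) =>
               t + (i : Int) * ((li.length : Int) * (li.length : Int)) + (j : Int) * (li.length : Int) + (k : Int))))) := by
  simp only [pv_fold2]
  exact pv_foldgen
    (fun x : Int => (List.range li.length).map (fun (j : Nat) =>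
      (List.range li.length).map (fun (k : Nat) => x + (j : Int) * (li.length : Int) + (k : Int))))
    ((li.length : Int) * (li.length : Int)) l t acc

-- B's slicing: taking the b-th length-n chunk of a length-(m*n) range-map
theorem pv_chunk {α : Type} (m n b : Nat) (f : Nat → α) (h : b < m) :
    (((List.range (m*n)).map f).drop (b*n)).take n
      = (List.range n).map (fun i => f (b*n + i)) := by
  rw [← List.map_drop, ← List.map_take, List.range_eq_range', List.drop_range']
  have hle : b*n + n ≤ m*n := by
    calc b*n + n = (b+1)*n := by ring
      _ ≤ m*n := Nat.mul_le_mul_right n (by omega)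
  have hsplit : List.range' (0 + b*n*1) (m*n - b*n)
      = List.range' (b*n) n ++ List.range' (b*n + 1*n) (m*n - b*n - n) := by
    rw [List.range'_append]
    congr 1 <;> omega
  rw [hsplit, List.take_left' (by simp), List.range'_eq_map_range, List.map_map]
  rfl

-- ===== VERDICT (by name: the statement is the Claim_ definition above) =====
theorem construir_tabela_spec : Claim_equal_construir_tabela := by
  intro N _
  unfold Spec_construir_tabela construir_tabela construir_tabela_alt
  simp only [pv_fold3, List.nil_append, PySem.List.length_pyRange_one, Int.sub_zero]
  rw [PySem.List.pyRange_one 0 N, PySem.List.pyRange_one 1 (N*N*N+1)]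
  simp only [List.map_map, Int.sub_zero, Int.add_sub_cancel]
  apply List.map_congr_left
  intro b hb
  simp only [List.mem_range] at hb
  have hN : ((N.toNat : Int)) = N := by omega
  simp only [Function.comp_apply]
  have hflat : (N*N*N).toNat = N.toNat * (N.toNat * N.toNat) := by
    rw [show N*N*N = ((N.toNat * (N.toNat * N.toNat) : Nat) : Int) from by push_cast [hN]; ring,
        Int.toNat_natCast]
  have e1 : (0 + (b:Int)) * N * N = ((b * (N.toNat * N.toNat) : Nat) : Int) := by
    push_cast [hN]; ring
  have e2 : (0 + (b:Int) + 1) * N * N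
      = ((b * (N.toNat * N.toNat) + N.toNat * N.toNat : Nat) : Int) := by
    push_cast [hN]; ring
  rw [e1, e2, PySem.List.slice_natCast, hflat,
      show b * (N.toNat * N.toNat) + N.toNat * N.toNat - b * (N.toNat * N.toNat)
        = N.toNat * N.toNat from by omega,
      pv_chunk N.toNat (N.toNat * N.toNat) b _ hb]
  apply List.map_congr_left
  intro j hj
  simp only [List.mem_range] at hj
  simp only [Function.comp_apply]
  have e3 : (0 + (j:Int)) * N = ((j * N.toNat : Nat) : Int) := by push_cast [hN]; ring
  have e4 : (0 + (j:Int) + 1) * N = ((j * N.toNat + N.toNat : Nat) : Int) := by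
    push_cast [hN]; ring
  rw [e3, e4, PySem.List.slice_natCast,
      show j * N.toNat + N.toNat - j * N.toNat = N.toNat from by omega,
      pv_chunk N.toNat N.toNat j _ hj]
  apply List.map_congr_left
  intro k _
  push_cast
  ring
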